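-- pv_equiv track=rewrite | github.com/jleete97/python-graphics | games/turns/reversi/reversimoves.py | buildSquareWeightings
-- ===== SOURCE A (Python) =====
-- def buildSquareWeightings(boardSize):
--     wts = []
--     # Initialize all squares to 1
--     for row in range(boardSize):
--         wts.append([])
--
--         for col in range(boardSize):
--             wts[row].append(1)
--
--     # Set sides
--     SIDE_WEIGHT = 4
--
--     for i in range(boardSize):
--         wts[0][i] = SIDE_WEIGHT
--         wts[boardSize - 1][i] = SIDE_WEIGHT
--         wts[i][0] = SIDE_WEIGHT
--         wts[i][boardSize - 1] = SIDE_WEIGHT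
--
--     # Set corners
--     CORNER_WEIGHT = 10
--
--     for row in [0, boardSize - 1]:
--         for col in [0, boardSize - 1]:
--             wts[row][col] = CORNER_WEIGHT
--
--     return wts
-- ===== SOURCE B (Python) =====
-- SIDE_WEIGHT = 4
-- CORNER_WEIGHT = 10
--
-- def buildSquareWeightings(boardSize):
--     n = boardSize
--     edge_row = [CORNER_WEIGHT if c == 0 or c == n - 1 else SIDE_WEIGHT for c in range(n)]
--     inner_row = [SIDE_WEIGHT if c == 0 or c == n - 1 else 1 for c in range(n)]
--     return [list(edge_row) if r == 0 or r == n - 1 else list(inner_row) for r in range(n)]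
-- ===== Notes on version B (the rewrite author's own statement) =====
-- stated objective: faster
-- what changed: Replaces A's three mutation passes (build all-1 grid cell by cell, overwrite side rows/columns, overwrite corners) by computing an edge-row and an inner-row template once from cell positions and emitting a copy of the right template per row.
-- outside the precondition, e.g. on buildSquareWeightings(0): A raises IndexError, B returns []
import Mathlib
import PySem

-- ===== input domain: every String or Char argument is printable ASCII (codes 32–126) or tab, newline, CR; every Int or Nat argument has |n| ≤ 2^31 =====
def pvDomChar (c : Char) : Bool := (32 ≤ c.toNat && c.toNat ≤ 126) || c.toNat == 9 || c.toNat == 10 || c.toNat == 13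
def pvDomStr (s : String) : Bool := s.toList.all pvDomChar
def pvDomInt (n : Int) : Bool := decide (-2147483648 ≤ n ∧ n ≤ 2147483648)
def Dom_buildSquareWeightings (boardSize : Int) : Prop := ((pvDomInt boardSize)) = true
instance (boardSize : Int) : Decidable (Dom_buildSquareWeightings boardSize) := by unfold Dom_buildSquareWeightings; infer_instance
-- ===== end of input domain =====

-- B replaces A's three mutation passes (all-ones grid, side overwrites, corner overwrites) by
-- building an edge-row and an inner-row template once and emitting a copy per row (objective:
-- faster, constant factor); A raises IndexError for boardSize ≤ 0, excluded by Pre_.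

-- ===== PORT A =====
-- wts[r][c] = v  — exact for the nonnegative in-range indices A's assignments use under Pre_
def pySetCell (w : List (List Int)) (r c : Int) (v : Int) : List (List Int) :=
  w.set r.toNat ((w.getD r.toNat []).set c.toNat v)

def buildSquareWeightings (boardSize : Int) : List (List Int) :=
  -- Initialize all squares to 1
  let wts := (PySem.List.pyRange 0 boardSize 1).foldl
    (fun w _ => w ++ [(PySem.List.pyRange 0 boardSize 1).foldl (fun row _ => row ++ [(1:Int)]) []]) []
  -- Set sides (SIDE_WEIGHT = 4)
  let wts := (PySem.List.pyRange 0 boardSize 1).foldl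
    (fun w i => pySetCell (pySetCell (pySetCell (pySetCell w 0 i 4)
                  (boardSize - 1) i 4) i 0 4) i (boardSize - 1) 4) wts
  -- Set corners (CORNER_WEIGHT = 10)
  [(0:Int), boardSize - 1].foldl
    (fun w row => [(0:Int), boardSize - 1].foldl (fun w' col => pySetCell w' row col 10) w) wts

-- ===== PORT B =====
def buildSquareWeightings_alt (boardSize : Int) : List (List Int) :=
  let edgeRow := (PySem.List.pyRange 0 boardSize 1).map
    (fun c => if c == 0 || c == boardSize - 1 then (10:Int) else 4)
  let innerRow := (PySem.List.pyRange 0 boardSize 1).map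
    (fun c => if c == 0 || c == boardSize - 1 then (4:Int) else 1)
  (PySem.List.pyRange 0 boardSize 1).map
    (fun r => if r == 0 || r == boardSize - 1 then edgeRow else innerRow)

-- ===== PRECONDITION & SPEC =====
-- A raises IndexError for boardSize ≤ 0 (its corner pass indexes wts[0] of the empty grid)
def Pre_buildSquareWeightings (boardSize : Int) : Prop := 1 ≤ boardSize
instance (boardSize : Int) : Decidable (Pre_buildSquareWeightings boardSize) := by
  unfold Pre_buildSquareWeightings; infer_instance
def pvWitness_buildSquareWeightings : Int := 3

def Spec_buildSquareWeightings (boardSize : Int) (out : List (List Int)) : Prop :=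
  out = buildSquareWeightings_alt boardSize
instance (boardSize : Int) (out : List (List Int)) : Decidable (Spec_buildSquareWeightings boardSize out) := by
  unfold Spec_buildSquareWeightings; infer_instance

-- ===== CLAIM (what is proved, stated in full; the proofs are below) =====
def Claim_equal_buildSquareWeightings : Prop := ∀ (boardSize : Int), Dom_buildSquareWeightings boardSize → Pre_buildSquareWeightings boardSize → Spec_buildSquareWeightings boardSize (buildSquareWeightings boardSize)

-- ===== LEMMAS AND PROOFS =====

-- cell access on the grid
def cellAt (w : List (List Int)) (r c : Nat) : Int := (w.getD r []).getD c 0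

lemma foldl_append_const {α β : Type} (l : List β) (x : α) (init : List α) :
    l.foldl (fun acc _ => acc ++ [x]) init = init ++ List.replicate l.length x := by
  induction l generalizing init with
  | nil => simp
  | cons b t ih => simp [ih, List.replicate_succ]

lemma getD_set_eq {α : Type} (l : List α) (i j : Nat) (x d : α) :
    (l.set i x).getD j d = if j = i ∧ i < l.length then x else l.getD j d := by
  simp only [List.getD_eq_getElem?_getD, List.getElem?_set]
  rcases eq_or_ne j i with h | h
  · subst h
    by_cases hl : j < l.length <;> simp [hl]
  · simp [h, Ne.symm h]

lemma length_pySetCell (w : List (List Int)) (r c v : Int) :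
    (pySetCell w r c v).length = w.length := by
  simp [pySetCell]

lemma rowlen_pySetCell (w : List (List Int)) (r c v : Int) (r' : Nat) :
    ((pySetCell w r c v).getD r' []).length = (w.getD r' []).length := by
  simp only [pySetCell, getD_set_eq]
  split_ifs with h
  · rcases h with ⟨h1, _⟩; simp [h1]
  · rfl

lemma cellAt_pySetCell (w : List (List Int)) (r c v : Int) (r' c' : Nat)
    (hr : r.toNat < w.length) (hc : c.toNat < (w.getD r.toNat []).length) :
    cellAt (pySetCell w r c v) r' c'
      = if r' = r.toNat ∧ c' = c.toNat then v else cellAt w r' c' := by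
  unfold cellAt pySetCell
  rw [getD_set_eq]
  by_cases h1 : r' = r.toNat
  · subst h1
    rw [if_pos ⟨rfl, hr⟩, getD_set_eq]
    by_cases h2 : c' = c.toNat
    · subst h2
      rw [if_pos ⟨rfl, hc⟩, if_pos ⟨rfl, rfl⟩]
    · rw [if_neg (by tauto), if_neg (by tauto)]
  · rw [if_neg (by tauto), if_neg (by tauto)]

-- shape of a grid: N rows, each of length N
def ShapeN (N : Nat) (w : List (List Int)) : Prop :=
  w.length = N ∧ ∀ r : Nat, r < N → (w.getD r []).length = N

lemma shapeN_pySetCell {N : Nat} {w : List (List Int)} (h : ShapeN N w) (r c v : Int) :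
    ShapeN N (pySetCell w r c v) := by
  exact ⟨by rw [length_pySetCell]; exact h.1,
    fun r' hr' => by rw [rowlen_pySetCell]; exact h.2 r' hr'⟩

lemma cellAt_pySetCell' {N : Nat} {w : List (List Int)} (h : ShapeN N w)
    (r c v : Int) (hr0 : 0 ≤ r) (hrN : r < N) (_hc0 : 0 ≤ c) (hcN : c < N) (r' c' : Nat) :
    cellAt (pySetCell w r c v) r' c'
      = if r' = r.toNat ∧ c' = c.toNat then v else cellAt w r' c' := by
  have hrn : r.toNat < N := by omega
  refine cellAt_pySetCell w r c v r' c' ?_ ?_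
  · rw [h.1]; exact hrn
  · rw [h.2 r.toNat hrn]; omega

-- the initial all-ones grid
lemma init_grid (n : Int) :
    (PySem.List.pyRange 0 n 1).foldl
      (fun w _ => w ++ [(PySem.List.pyRange 0 n 1).foldl (fun row _ => row ++ [(1:Int)]) []]) []
    = List.replicate n.toNat (List.replicate n.toNat (1:Int)) := by
  rw [foldl_append_const, foldl_append_const]
  simp [PySem.List.length_pyRange_one]

lemma shapeN_replicate (N : Nat) : ShapeN N (List.replicate N (List.replicate N (1:Int))) := by
  refine ⟨by simp, fun r hr => ?_⟩
  rw [List.getD_eq_getElem?_getD]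
  simp [hr]

lemma cellAt_replicate (N : Nat) (r c : Nat) (hr : r < N) (hc : c < N) :
    cellAt (List.replicate N (List.replicate N (1:Int))) r c = 1 := by
  simp [cellAt, List.getD_eq_getElem?_getD, hr, hc]

-- one side-pass step
def sideStep (n : Int) (w : List (List Int)) (i : Int) : List (List Int) :=
  pySetCell (pySetCell (pySetCell (pySetCell w 0 i 4) (n - 1) i 4) i 0 4) i (n - 1) 4

-- invariant for the side pass after processing range(k)
lemma sides_inv (N : Nat) (hN : 1 ≤ N) (k : Nat) (hk : k ≤ N) :
    ShapeN N ((PySem.List.pyRange 0 (k : Int) 1).foldl (sideStep (N : Int))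
      (List.replicate N (List.replicate N (1:Int)))) ∧
    ∀ r c : Nat, r < N → c < N →
      cellAt ((PySem.List.pyRange 0 (k : Int) 1).foldl (sideStep (N : Int))
        (List.replicate N (List.replicate N (1:Int)))) r c
      = if ((r = 0 ∨ r = N - 1) ∧ c < k) ∨ ((c = 0 ∨ c = N - 1) ∧ r < k) then 4 else 1 := by
  induction k with
  | zero =>
    rw [PySem.List.pyRange_one_eq_nil (by norm_num)]
    refine ⟨shapeN_replicate N, fun r c hr hc => ?_⟩
    simp [cellAt_replicate N r c hr hc]
  | succ k ih =>
    have hk' : k ≤ N := by omega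
    obtain ⟨hsh, hcell⟩ := ih hk'
    have hrange : PySem.List.pyRange 0 ((k:Int) + 1) 1
        = PySem.List.pyRange 0 (k : Int) 1 ++ [(k : Int)] := by
      exact PySem.List.pyRange_one_succ_right (by positivity)
    have hcast : ((k + 1 : Nat) : Int) = (k : Int) + 1 := by push_cast; ring
    rw [hcast, hrange, List.foldl_append]
    set w := (PySem.List.pyRange 0 (k : Int) 1).foldl (sideStep (N : Int))
      (List.replicate N (List.replicate N (1:Int))) with hw
    simp only [List.foldl_cons, List.foldl_nil]
    have hkN : (k : Int) < (N : Int) := by exact_mod_cast (by omega : k < N)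
    have hk0 : (0:Int) ≤ (k : Int) := by positivity
    have h0N : (0:Int) < (N : Int) := by exact_mod_cast (by omega : 0 < N)
    have hNm10 : (0:Int) ≤ (N : Int) - 1 := by omega
    have hNm1N : (N : Int) - 1 < (N : Int) := by omega
    have s1 := shapeN_pySetCell hsh (0:Int) (k:Int) 4
    have s2 := shapeN_pySetCell s1 ((N:Int) - 1) (k:Int) 4
    have s3 := shapeN_pySetCell s2 (k:Int) (0:Int) 4
    have s4 := shapeN_pySetCell s3 (k:Int) ((N:Int) - 1) 4
    refine ⟨s4, fun r c hr hc => ?_⟩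
    rw [sideStep,
      cellAt_pySetCell' s3 (k:Int) ((N:Int)-1) 4 hk0 hkN hNm10 hNm1N,
      cellAt_pySetCell' s2 (k:Int) (0:Int) 4 hk0 hkN le_rfl h0N,
      cellAt_pySetCell' s1 ((N:Int)-1) (k:Int) 4 hNm10 hNm1N hk0 hkN,
      cellAt_pySetCell' hsh (0:Int) (k:Int) 4 le_rfl h0N hk0 hkN,
      hcell r c hr hc]
    have e1 : ((N:Int) - 1).toNat = N - 1 := by omega
    have e2 : (k:Int).toNat = k := by omega
    have e3 : ((0:Int)).toNat = 0 := rfl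
    rw [e1, e2, e3]
    split_ifs <;> omega

-- the corner pass on a grid of shape N
lemma corners_cell (N : Nat) (hN : 1 ≤ N) (w : List (List Int)) (hsh : ShapeN N w)
    (r c : Nat) (_hr : r < N) (_hc : c < N) :
    cellAt ([(0:Int), (N:Int) - 1].foldl
      (fun w' row => [(0:Int), (N:Int) - 1].foldl (fun w'' col => pySetCell w'' row col 10) w') w) r c
    = if (r = 0 ∨ r = N - 1) ∧ (c = 0 ∨ c = N - 1) then 10 else cellAt w r c := by
  have h0N : (0:Int) < (N : Int) := by exact_mod_cast (by omega : 0 < N)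
  have hNm10 : (0:Int) ≤ (N : Int) - 1 := by omega
  have hNm1N : (N : Int) - 1 < (N : Int) := by omega
  simp only [List.foldl_cons, List.foldl_nil]
  have s1 := shapeN_pySetCell hsh (0:Int) (0:Int) 10
  have s2 := shapeN_pySetCell s1 (0:Int) ((N:Int) - 1) 10
  have s3 := shapeN_pySetCell s2 ((N:Int) - 1) (0:Int) 10
  rw [cellAt_pySetCell' s3 ((N:Int)-1) ((N:Int)-1) 10 hNm10 hNm1N hNm10 hNm1N,
    cellAt_pySetCell' s2 ((N:Int)-1) (0:Int) 10 hNm10 hNm1N le_rfl h0N,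
    cellAt_pySetCell' s1 (0:Int) ((N:Int)-1) 10 le_rfl h0N hNm10 hNm1N,
    cellAt_pySetCell' hsh (0:Int) (0:Int) 10 le_rfl h0N le_rfl h0N]
  have e1 : ((N:Int) - 1).toNat = N - 1 := by omega
  have e3 : ((0:Int)).toNat = 0 := rfl
  rw [e1, e3]
  split_ifs <;> omega

-- the per-cell weight both grids realize
def cellW (N r c : Nat) : Int :=
  if (r = 0 ∨ r = N - 1) ∧ (c = 0 ∨ c = N - 1) then 10
  else if (r = 0 ∨ r = N - 1) ∨ (c = 0 ∨ c = N - 1) then 4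
  else 1

-- a grid of shape N with known cells is the corresponding range-map
lemma grid_eq_map (N : Nat) (w : List (List Int)) (hsh : ShapeN N w) (f : Nat → Nat → Int)
    (h : ∀ r c : Nat, r < N → c < N → cellAt w r c = f r c) :
    w = (List.range N).map (fun r => (List.range N).map (fun c => f r c)) := by
  apply List.ext_getElem
  · simp [hsh.1]
  · intro r h1 h2
    have hrN : r < N := hsh.1 ▸ h1
    have hwr : w.getD r [] = w[r] := List.getD_eq_getElem w [] h1
    have hrow : w[r].length = N := by rw [← hwr]; exact hsh.2 r hrN
    apply List.ext_getElem
    · simp [hrow]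
    · intro c hc1 hc2
      have hcN : c < N := by rw [hrow] at hc1; exact hc1
      have hv := h r c hrN hcN
      simp only [cellAt, hwr] at hv
      rw [List.getD_eq_getElem w[r] 0 hc1] at hv
      simp only [List.getElem_map, List.getElem_range]
      exact hv

lemma pyRange_cast (N : Nat) :
    PySem.List.pyRange 0 (N : Int) 1 = (List.range N).map (Nat.cast : Nat → Int) := by
  apply List.ext_getElem
  · simp [PySem.List.length_pyRange_one]
  · intro k h1 h2
    rw [PySem.List.getElem_pyRange_one]
    simp only [List.getElem_map, List.getElem_range, zero_add]

lemma beq_edge (N x : Nat) (hN : 1 ≤ N) :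
    ((x : Int) == 0 || (x : Int) == (N : Int) - 1) = decide (x = 0 ∨ x = N - 1) := by
  by_cases h0 : x = 0 <;> by_cases h1 : x = N - 1 <;> simp [h0, h1] <;> omega

-- B's row-template grid realizes cellW
lemma alt_eq (N : Nat) (hN : 1 ≤ N) :
    buildSquareWeightings_alt (N : Int)
      = (List.range N).map (fun r => (List.range N).map (fun c => cellW N r c)) := by
  unfold buildSquareWeightings_alt
  rw [pyRange_cast, List.map_map]
  apply List.map_congr_left
  intro r hr
  rw [List.mem_range] at hr
  simp only [Function.comp_def, beq_edge N r hN]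
  by_cases hedge : r = 0 ∨ r = N - 1
  all_goals simp only [hedge, decide_true, decide_false, if_true, if_false,
    Bool.false_eq_true, reduceIte]
  all_goals rw [List.map_map]
  all_goals apply List.map_congr_left
  all_goals intro c hc
  all_goals rw [List.mem_range] at hc
  all_goals simp only [Function.comp_def, beq_edge N c hN, cellW]
  all_goals by_cases hc2 : c = 0 ∨ c = N - 1
  all_goals simp [hc2, hedge]

-- main pointwise equality
lemma main_eq (n : Int) (hn : 1 ≤ n) :
    buildSquareWeightings n = buildSquareWeightings_alt n := by
  obtain ⟨N, rfl⟩ : ∃ N : Nat, n = (N : Int) := ⟨n.toNat, by omega⟩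
  have hN : 1 ≤ N := by exact_mod_cast hn
  unfold buildSquareWeightings
  rw [init_grid]
  simp only [Int.toNat_natCast]
  obtain ⟨hsh, hcell⟩ := sides_inv N hN N le_rfl
  have hshf : ShapeN N ([(0:Int), (N:Int) - 1].foldl
      (fun w' row => [(0:Int), (N:Int) - 1].foldl (fun w'' col => pySetCell w'' row col 10) w')
      ((PySem.List.pyRange 0 (N:Int) 1).foldl (sideStep (N:Int))
        (List.replicate N (List.replicate N (1:Int))))) := by
    simp only [List.foldl_cons, List.foldl_nil]
    exact shapeN_pySetCell (shapeN_pySetCell (shapeN_pySetCell (shapeN_pySetCell hsh _ _ _) _ _ _) _ _ _) _ _ _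
  have hfc : ∀ r c : Nat, r < N → c < N →
      cellAt ([(0:Int), (N:Int) - 1].foldl
        (fun w' row => [(0:Int), (N:Int) - 1].foldl (fun w'' col => pySetCell w'' row col 10) w')
        ((PySem.List.pyRange 0 (N:Int) 1).foldl (sideStep (N:Int))
          (List.replicate N (List.replicate N (1:Int))))) r c
      = cellW N r c := by
    intro r c hr hc
    rw [corners_cell N hN _ hsh r c hr hc, hcell r c hr hc]
    unfold cellW
    split_ifs <;> omega
  exact Eq.trans (grid_eq_map N _ hshf (cellW N) hfc) (alt_eq N hN).symm

-- ===== VERDICT (by name: the statement is the Claim_ definition above) =====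
theorem buildSquareWeightings_spec : Claim_equal_buildSquareWeightings := by
  intro n _ hpre
  unfold Spec_buildSquareWeightings
  exact main_eq n hpre
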